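-- pv_equiv track=rewrite | github.com/BusyStas/gems | UnneededSampleCodeSnippets/HowToParsePDFInvoiceFromGRA.py | extract_gem_type
-- ===== SOURCE A (Python) =====
-- def extract_gem_type(description):
--     """Extract gem type from description with priority ordering"""
--     gem_mapping = {
--         # Specific varieties first (longer matches)
--         'almandine garnet': 'Almandine Garnet',
--         'rhodolite garnet': 'Rhodolite Garnet',
--         'hessonite garnet': 'Hessonite Garnet',
--         'white garnet': 'White Garnet',
--         'green tourmaline': 'Green Tourmaline',
--
--         # Then general types
--         'vayrynenite': 'Vayrynenite',
--         'grandidierite': 'Grandidierite',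
--         'hackmanite': 'Hackmanite',
--         'scapolite': 'Scapolite',
--         'garnet': 'Garnet',
--         'quartz': 'Quartz',
--         'tourmaline': 'Tourmaline',
--         'spinel': 'Spinel',
--         'peridot': 'Peridot',
--         'apatite': 'Apatite',
--         'ruby': 'Ruby',
--         'emerald': 'Emerald',
--         'sapphire': 'Sapphire',
--         'alexandrite': 'Alexandrite',
--         'topaz': 'Topaz',
--         'aquamarine': 'Aquamarine',
--         'tanzanite': 'Tanzanite'
--     }
--
--     description_lower = description.lower()
--
--     # Check for specific types first (longest matches first)
--     for gem_key in sorted(gem_mapping.keys(), key=lambda x: -len(x)):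
--         if gem_key in description_lower:
--             return gem_mapping[gem_key]
--
--     return "Unknown"
-- ===== SOURCE B (Python) =====
-- def extract_gem_type(description):
--     """Extract gem type from description with priority ordering"""
--     gem_mapping = {
--         'almandine garnet': 'Almandine Garnet',
--         'rhodolite garnet': 'Rhodolite Garnet',
--         'hessonite garnet': 'Hessonite Garnet',
--         'white garnet': 'White Garnet',
--         'green tourmaline': 'Green Tourmaline',
--         'vayrynenite': 'Vayrynenite',
--         'grandidierite': 'Grandidierite',
--         'hackmanite': 'Hackmanite',
--         'scapolite': 'Scapolite',
--         'garnet': 'Garnet',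
--         'quartz': 'Quartz',
--         'tourmaline': 'Tourmaline',
--         'spinel': 'Spinel',
--         'peridot': 'Peridot',
--         'apatite': 'Apatite',
--         'ruby': 'Ruby',
--         'emerald': 'Emerald',
--         'sapphire': 'Sapphire',
--         'alexandrite': 'Alexandrite',
--         'topaz': 'Topaz',
--         'aquamarine': 'Aquamarine',
--         'tanzanite': 'Tanzanite'
--     }
--
--     description_lower = description.lower()
--
--     # One pass in insertion order: keep the first match of maximal length.
--     # (Strict '>' preserves the original's insertion-order tie-break; no sort needed.)
--     best = None
--     for gem_key in gem_mapping:
--         if gem_key in description_lower and (best is None or len(gem_key) > len(best)):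
--             best = gem_key
--
--     return gem_mapping[best] if best is not None else "Unknown"
-- ===== Notes on version B (the rewrite author's own statement) =====
-- stated objective: simpler
-- what changed: B drops A's sort of the keyword list and instead makes a single pass over the dict in insertion order, keeping the first match of maximal length (strict '>' preserves A's stable-sort tie-break).
import Mathlib
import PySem

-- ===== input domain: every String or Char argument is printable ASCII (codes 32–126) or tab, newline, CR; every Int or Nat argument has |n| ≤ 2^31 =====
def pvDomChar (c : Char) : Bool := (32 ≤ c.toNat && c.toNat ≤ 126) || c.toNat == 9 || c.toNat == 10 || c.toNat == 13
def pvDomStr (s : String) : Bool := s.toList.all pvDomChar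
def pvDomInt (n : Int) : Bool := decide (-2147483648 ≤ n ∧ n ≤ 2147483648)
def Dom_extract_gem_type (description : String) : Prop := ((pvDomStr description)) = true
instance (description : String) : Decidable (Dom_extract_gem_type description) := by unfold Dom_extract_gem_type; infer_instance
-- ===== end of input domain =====

-- B drops A's sort of the keyword list: one pass over the dict in insertion order keeping the
-- first match of maximal length (objective: simpler — no sort, one loop).

-- the dict literal both Pythons contain verbatim
def gemPairs : List (String × String) :=
  [("almandine garnet", "Almandine Garnet"),
   ("rhodolite garnet", "Rhodolite Garnet"),
   ("hessonite garnet", "Hessonite Garnet"),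
   ("white garnet", "White Garnet"),
   ("green tourmaline", "Green Tourmaline"),
   ("vayrynenite", "Vayrynenite"),
   ("grandidierite", "Grandidierite"),
   ("hackmanite", "Hackmanite"),
   ("scapolite", "Scapolite"),
   ("garnet", "Garnet"),
   ("quartz", "Quartz"),
   ("tourmaline", "Tourmaline"),
   ("spinel", "Spinel"),
   ("peridot", "Peridot"),
   ("apatite", "Apatite"),
   ("ruby", "Ruby"),
   ("emerald", "Emerald"),
   ("sapphire", "Sapphire"),
   ("alexandrite", "Alexandrite"),
   ("topaz", "Topaz"),
   ("aquamarine", "Aquamarine"),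
   ("tanzanite", "Tanzanite")]

-- ===== PORT A =====
def gemDictA : PySem.Dict String String := PySem.Dict.ofList gemPairs

-- the 'for gem_key in sorted(...): if gem_key in description_lower: return gem_mapping[gem_key]' loop
-- (gem_mapping[gem_key] is total here: gem_key always comes from the dict's own keys, so the
--  getD default is never reached)
def A_loop (d : PySem.Dict String String) (dl : String) : List String → String
  | [] => "Unknown"
  | k :: rest => if PySem.Str.isIn k dl then d.getD k "Unknown" else A_loop d dl rest

def extract_gem_type (description : String) : String :=
  let description_lower := PySem.Str.lower description
  A_loop gemDictA description_lower
    (PySem.List.sorted gemDictA.keys (fun x => -(PySem.Str.len x : Int)) false)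

-- ===== PORT B =====
def gemDictB : PySem.Dict String String := PySem.Dict.ofList gemPairs

-- 'best = None; for gem_key in gem_mapping: if gem_key in description_lower and (best is None
--  or len(gem_key) > len(best)): best = gem_key' then the final lookup
def extract_gem_type_alt (description : String) : String :=
  let description_lower := PySem.Str.lower description
  let best := gemDictB.keys.foldl
    (fun best k =>
      if PySem.Str.isIn k description_lower &&
         (match best with
          | none => true
          | some b => decide (PySem.Str.len b < PySem.Str.len k)) then some k else best)
    none
  match best with
  | some k => gemDictB.getD k "Unknown"
  | none => "Unknown"

-- ===== PRECONDITION & SPEC =====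
def Spec_extract_gem_type (description : String) (out : String) : Prop := out = extract_gem_type_alt description
instance (description : String) (out : String) : Decidable (Spec_extract_gem_type description out) := by unfold Spec_extract_gem_type; infer_instance

-- ===== CLAIM (what is proved, stated in full; the proofs are below) =====
def Claim_equal_extract_gem_type : Prop := ∀ (description : String), Dom_extract_gem_type description → Spec_extract_gem_type description (extract_gem_type description)

-- ===== LEMMAS AND PROOFS =====

-- A's early-return scan, with the dict lookup abstracted away
def aChain (p : String → Bool) : List String → Option String
  | [] => none
  | k :: rest => if p k then some k else aChain p rest

-- B's fold step, with the substring test abstracted to p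
def fB (p : String → Bool) (best : Option String) (k : String) : Option String :=
  if p k &&
     (match best with
      | none => true
      | some b => decide (PySem.Str.len b < PySem.Str.len k)) then some k else best

theorem A_loop_eq (d : PySem.Dict String String) (dl : String) (l : List String) :
    A_loop d dl l = (aChain (fun k => PySem.Str.isIn k dl) l).elim "Unknown" (fun k => d.getD k "Unknown") := by
  induction l with
  | nil => rfl
  | cons k rest ih => simp only [A_loop, aChain]; split <;> simp [ih]

-- the fold's result is its start value or a matching element of the list
theorem foldl_fB_mem (p : String → Bool) (l : List String) : ∀ (acc : Option String),
    l.foldl (fB p) acc = acc ∨ ∃ b ∈ l, l.foldl (fB p) acc = some b ∧ p b = true := by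
  induction l with
  | nil => intro acc; left; rfl
  | cons k t ih =>
    intro acc
    have hstep : fB p acc k = acc ∨ (fB p acc k = some k ∧ p k = true) := by
      rcases Bool.eq_false_or_eq_true (p k) with hpk | hpk
      · cases acc with
        | none =>
          right
          refine ⟨?_, hpk⟩
          show (if (p k && true) = true then some k else none) = some k
          simp [hpk]
        | some b =>
          by_cases hlt : PySem.Str.len b < PySem.Str.len k
          · right
            refine ⟨?_, hpk⟩
            show (if (p k && decide (PySem.Str.len b < PySem.Str.len k)) = true
                  then some k else some b) = some k
            rw [if_pos (by rw [hpk, decide_eq_true hlt]; rfl)]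
          · left
            show (if (p k && decide (PySem.Str.len b < PySem.Str.len k)) = true
                  then some k else some b) = some b
            rw [if_neg (by rw [hpk, decide_eq_false hlt]; exact Bool.false_ne_true)]
      · left
        cases acc with
        | none =>
          show (if (p k && true) = true then some k else none) = none
          simp [hpk]
        | some b =>
          show (if (p k && decide (PySem.Str.len b < PySem.Str.len k)) = true
                then some k else some b) = some b
          simp [hpk]
    simp only [List.foldl_cons]
    rcases ih (fB p acc k) with h | ⟨b, hb, he, hpb⟩
    · rcases hstep with hs | ⟨hs, hpk⟩
      · left; rw [h, hs]
      · right; exact ⟨k, by simp, by rw [h, hs], hpk⟩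
    · right; exact ⟨b, by simp [hb], he, hpb⟩

-- a kept best survives a segment whose matches are no longer than it
theorem foldl_fB_stay (p : String → Bool) (l : List String) : ∀ (b : String),
    (∀ k ∈ l, p k = true → PySem.Str.len k ≤ PySem.Str.len b) →
    l.foldl (fB p) (some b) = some b := by
  induction l with
  | nil => intro b _; rfl
  | cons k t ih =>
    intro b hb
    have hstep : fB p (some b) k = some b := by
      show (if (p k && decide (PySem.Str.len b < PySem.Str.len k)) = true
            then some k else some b) = some b
      rw [if_neg]
      simp only [Bool.and_eq_true, decide_eq_true_eq, not_and, not_lt]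
      intro hpk
      exact hb k List.mem_cons_self hpk
    simp only [List.foldl_cons, hstep]
    exact ih b (fun x hx => hb x (List.mem_cons_of_mem _ hx))

-- an element the predicate rejects can be deleted from the fold
theorem foldl_fB_skip (p : String → Bool) (l1 l2 : List String) (s : String) (acc : Option String)
    (hs : p s = false) :
    (l1 ++ s :: l2).foldl (fB p) acc = (l1 ++ l2).foldl (fB p) acc := by
  rw [List.foldl_append, List.foldl_append, List.foldl_cons]
  have : fB p (l1.foldl (fB p) acc) s = l1.foldl (fB p) acc := by
    unfold fB; rw [if_neg]; simp [hs]
  rw [this]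

-- if [s,k] is a sublist of L1 ++ s :: L2 and s does not occur in L1, then k lies in L2
theorem pair_pos (s k : String) (L1 L2 : List String) :
    s ∉ L1 → List.Sublist [s, k] (L1 ++ s :: L2) → k ∈ L2 := by
  induction L1 with
  | nil =>
    intro _ hsub
    rw [List.nil_append] at hsub
    rcases List.sublist_cons_iff.mp hsub with h | ⟨r, hr, hrs⟩
    · exact h.mem (by simp)
    · injection hr with h1 h2
      rw [← h2] at hrs
      exact hrs.mem (by simp)
  | cons x t ih =>
    intro hs hsub
    rw [List.cons_append] at hsub
    rcases List.sublist_cons_iff.mp hsub with h | ⟨r, hr, hrs⟩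
    · exact ih (fun h' => hs (List.mem_cons_of_mem _ h')) h
    · injection hr with h1 h2
      exact absurd (h1 ▸ List.mem_cons_self) hs

-- pairs avoiding s survive the removal of the middle s
theorem sublist_drop_mid (a b s : String) (L1 L2 : List String) :
    a ≠ s → b ≠ s → s ∉ L1 → s ∉ L2 →
    List.Sublist [a, b] (L1 ++ s :: L2) → List.Sublist [a, b] (L1 ++ L2) := by
  intro ha hb h1 h2 hsub
  have hf : List.Sublist ([a, b].filter (fun x => x ≠ s))
      ((L1 ++ s :: L2).filter (fun x => x ≠ s)) := List.Sublist.filter _ hsub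
  have e1 : [a, b].filter (fun x => x ≠ s) = [a, b] := by simp [ha, hb]
  have e2 : (L1 ++ s :: L2).filter (fun x => x ≠ s) = L1 ++ L2 := by
    rw [List.filter_append, List.filter_cons]
    simp only [decide_eq_true_eq]
    rw [if_neg (by simp)]
    rw [List.filter_eq_self.mpr (fun x hx => by simp; exact fun h => h1 (h ▸ hx)),
        List.filter_eq_self.mpr (fun x hx => by simp; exact fun h => h2 (h ▸ hx))]
  rwa [e1, e2] at hf

-- the heart: A's scan of the sorted list = B's best-keeping fold over the original list,
-- for ANY priority-consistent pair of lists (S sorted by length desc, stable w.r.t. L)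
theorem chain_eq_fold_gen (p : String → Bool) : ∀ (S L : List String),
    S.Perm L → S.Nodup →
    S.Pairwise (fun a b => PySem.Str.len b ≤ PySem.Str.len a ∧
      (PySem.Str.len a = PySem.Str.len b → List.Sublist [a, b] L)) →
    aChain p S = L.foldl (fB p) none := by
  intro S
  induction S with
  | nil =>
    intro L hperm _ _
    rw [List.Perm.eq_nil hperm.symm]; rfl
  | cons s S' ih =>
    intro L hperm hnd hpair
    have hndL : L.Nodup := hperm.nodup hnd
    have hsL : s ∈ L := hperm.mem_iff.mp List.mem_cons_self
    obtain ⟨L1, L2, rfl⟩ := List.append_of_mem hsL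
    have hsplit := List.nodup_append.mp hndL
    have hs1 : s ∉ L1 := fun h => (hsplit.2.2 s h s (by simp)) rfl
    have hs2 : s ∉ L2 := by
      have := hsplit.2.1
      simp only [List.nodup_cons] at this
      exact this.1
    have hrel : ∀ k ∈ S', PySem.Str.len k ≤ PySem.Str.len s ∧
        (PySem.Str.len s = PySem.Str.len k → List.Sublist [s, k] (L1 ++ s :: L2)) :=
      fun k hk => (List.pairwise_cons.mp hpair).1 k hk
    by_cases hps : p s = true
    · -- A returns s; B's fold also ends in s
      have hA : aChain p (s :: S') = some s := by simp [aChain, hps]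
      rw [hA, List.foldl_append, List.foldl_cons]
      -- the prefix can only have produced a strictly shorter best
      have hstep : fB p (L1.foldl (fB p) none) s = some s := by
        rcases foldl_fB_mem p L1 none with h | ⟨b, hbL1, hbe, hpb⟩
        · rw [h]
          show (if (p s && true) = true then some s else none) = some s
          rw [if_pos (by rw [hps]; rfl)]
        · rw [hbe]
          have hbS : b ∈ s :: S' := hperm.mem_iff.mpr (by simp [hbL1])
          have hbs : b ≠ s := fun h => hs1 (h ▸ hbL1)
          have hbS' : b ∈ S' := by
            rcases List.mem_cons.mp hbS with h | h
            · exact absurd h hbs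
            · exact h
          have hlt : PySem.Str.len b < PySem.Str.len s := by
            have hle := (hrel b hbS').1
            by_cases heq : PySem.Str.len s = PySem.Str.len b
            · exfalso
              have hk2 : b ∈ L2 := pair_pos s b L1 L2 hs1 ((hrel b hbS').2 heq)
              exact (hsplit.2.2 b hbL1 b (by simp [hk2])) rfl
            · omega
          show (if (p s && decide (PySem.Str.len b < PySem.Str.len s)) = true
                then some s else some b) = some s
          rw [if_pos (by rw [hps, decide_eq_true hlt]; rfl)]
      rw [hstep]
      -- and the suffix has no strictly longer match
      refine (foldl_fB_stay p L2 s (fun k hk hpk => ?_)).symm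
      have hkS : k ∈ s :: S' := hperm.mem_iff.mpr (by simp [hk])
      rcases List.mem_cons.mp hkS with h | h
      · exact h ▸ le_refl _
      · exact (hrel k h).1
    · -- s matches nowhere: both sides ignore it
      have hA : aChain p (s :: S') = aChain p S' := by
        simp [aChain, hps]
      rw [hA, foldl_fB_skip p L1 L2 s none (Bool.eq_false_iff.mpr hps)]
      have hsS' : s ∉ S' := (List.nodup_cons.mp hnd).1
      refine ih (L1 ++ L2) ?_ (List.nodup_cons.mp hnd).2 ?_
      · exact (List.perm_middle.symm.trans hperm.symm).cons_inv.symm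
      · refine List.Pairwise.imp_of_mem ?_ (List.pairwise_cons.mp hpair).2
        intro a b ha hb hab
        refine ⟨hab.1, fun he => ?_⟩
        exact sublist_drop_mid a b s L1 L2 (fun h => hsS' (h ▸ ha)) (fun h => hsS' (h ▸ hb))
          hs1 hs2 (hab.2 he)

-- the two concrete key lists of the ports satisfy the hypotheses (kernel-checked)
theorem chain_eq_fold (p : String → Bool) :
    aChain p ["almandine garnet", "rhodolite garnet", "hessonite garnet", "green tourmaline", "grandidierite", "white garnet", "vayrynenite", "alexandrite", "hackmanite", "tourmaline", "aquamarine", "scapolite", "tanzanite", "sapphire", "peridot", "apatite", "emerald", "garnet", "quartz", "spinel", "topaz", "ruby"]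
      = (["almandine garnet", "rhodolite garnet", "hessonite garnet", "white garnet", "green tourmaline", "vayrynenite", "grandidierite", "hackmanite", "scapolite", "garnet", "quartz", "tourmaline", "spinel", "peridot", "apatite", "ruby", "emerald", "sapphire", "alexandrite", "topaz", "aquamarine", "tanzanite"] : List String).foldl (fB p) none :=
  chain_eq_fold_gen p _ _ (by decide) (by decide) (by decide)

-- the concrete priority list A's sort produces (stable: equal lengths keep insertion order)
theorem sortedKeysA_eq :
    PySem.List.sorted gemDictA.keys (fun x => -(PySem.Str.len x : Int)) false
      = ["almandine garnet", "rhodolite garnet", "hessonite garnet", "green tourmaline", "grandidierite", "white garnet", "vayrynenite", "alexandrite", "hackmanite", "tourmaline", "aquamarine", "scapolite", "tanzanite", "sapphire", "peridot", "apatite", "emerald", "garnet", "quartz", "spinel", "topaz", "ruby"] := by decide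

theorem keysB_eq : gemDictB.keys = ["almandine garnet", "rhodolite garnet", "hessonite garnet", "white garnet", "green tourmaline", "vayrynenite", "grandidierite", "hackmanite", "scapolite", "garnet", "quartz", "tourmaline", "spinel", "peridot", "apatite", "ruby", "emerald", "sapphire", "alexandrite", "topaz", "aquamarine", "tanzanite"] := by decide

theorem alt_eq (description : String) :
    extract_gem_type_alt description
      = ((["almandine garnet", "rhodolite garnet", "hessonite garnet", "white garnet", "green tourmaline", "vayrynenite", "grandidierite", "hackmanite", "scapolite", "garnet", "quartz", "tourmaline", "spinel", "peridot", "apatite", "ruby", "emerald", "sapphire", "alexandrite", "topaz", "aquamarine", "tanzanite"] : List String).foldl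
          (fB (fun k => PySem.Str.isIn k (PySem.Str.lower description))) none).elim
          "Unknown" (fun k => gemDictB.getD k "Unknown") := by
  unfold extract_gem_type_alt
  rw [keysB_eq]
  show (match (["almandine garnet", "rhodolite garnet", "hessonite garnet", "white garnet", "green tourmaline", "vayrynenite", "grandidierite", "hackmanite", "scapolite", "garnet", "quartz", "tourmaline", "spinel", "peridot", "apatite", "ruby", "emerald", "sapphire", "alexandrite", "topaz", "aquamarine", "tanzanite"] : List String).foldl
          (fB (fun k => PySem.Str.isIn k (PySem.Str.lower description))) none with
        | some k => gemDictB.getD k "Unknown"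
        | none => "Unknown") = _
  cases (["almandine garnet", "rhodolite garnet", "hessonite garnet", "white garnet", "green tourmaline", "vayrynenite", "grandidierite", "hackmanite", "scapolite", "garnet", "quartz", "tourmaline", "spinel", "peridot", "apatite", "ruby", "emerald", "sapphire", "alexandrite", "topaz", "aquamarine", "tanzanite"] : List String).foldl
      (fB (fun k => PySem.Str.isIn k (PySem.Str.lower description))) none <;> rfl

-- ===== VERDICT (by name: the statement is the Claim_ definition above) =====
theorem extract_gem_type_spec : Claim_equal_extract_gem_type := by
  intro description _
  unfold Spec_extract_gem_type extract_gem_type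
  rw [sortedKeysA_eq, A_loop_eq, chain_eq_fold, alt_eq, show gemDictA = gemDictB from rfl]
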